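-- pv_equiv track=rewrite | github.com/Anshuman-Jagani/Neurocanvas | ml/nlp/prompt_analyzer.py | detect_artistic_concepts
-- ===== SOURCE A (Python) =====
-- def detect_artistic_concepts(prompt, keywords):
--     """
--     Detect high-level artistic concepts from prompt and keywords
--
--     Args:
--         prompt (str): Original prompt
--         keywords (dict): Extracted keywords
--
--     Returns:
--         list: Detected artistic concepts
--     """
--     concepts = []
--     prompt_lower = prompt.lower()
--
--     # Detect based on keywords
--     keyword_list = keywords.get('keywords', [])
--
--     # Nature/Landscape
--     nature_keywords = ['mountain', 'ocean', 'forest', 'landscape', 'nature', 'tree', 'sky']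
--     if any(kw in keyword_list or kw in prompt_lower for kw in nature_keywords):
--         concepts.append('nature/landscape')
--
--     # Urban/Architecture
--     urban_keywords = ['city', 'building', 'urban', 'street', 'architecture']
--     if any(kw in keyword_list or kw in prompt_lower for kw in urban_keywords):
--         concepts.append('urban/architecture')
--
--     # Fantasy/Magical
--     fantasy_keywords = ['fantasy', 'magical', 'mystical', 'ethereal', 'dragon', 'castle']
--     if any(kw in keyword_list or kw in prompt_lower for kw in fantasy_keywords):
--         concepts.append('fantasy/magical')
--
--     # Sci-Fi/Futuristic
--     scifi_keywords = ['scifi', 'futuristic', 'cyberpunk', 'space', 'robot', 'alien']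
--     if any(kw in keyword_list or kw in prompt_lower for kw in scifi_keywords):
--         concepts.append('sci-fi/futuristic')
--
--     # Portrait/Character
--     portrait_keywords = ['portrait', 'face', 'person', 'character', 'woman', 'man']
--     if any(kw in keyword_list or kw in prompt_lower for kw in portrait_keywords):
--         concepts.append('portrait/character')
--
--     # Abstract
--     abstract_keywords = ['abstract', 'geometric', 'pattern', 'shapes']
--     if any(kw in keyword_list or kw in prompt_lower for kw in abstract_keywords):
--         concepts.append('abstract/geometric')
--
--     return concepts if concepts else ['general']
-- ===== SOURCE B (Python) =====
-- # Inverted matching: instead of searching each keyword in the prompt, slide a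
-- # window over the prompt and look each window up in a keyword->concept hash map
-- # (plus direct lookups of the keyword-list entries), then emit hit concepts in
-- # the fixed order.
--
-- _CONCEPT_ORDER = [
--     'nature/landscape', 'urban/architecture', 'fantasy/magical',
--     'sci-fi/futuristic', 'portrait/character', 'abstract/geometric',
-- ]
--
-- _KEYWORD_TO_CONCEPT = {
--     'mountain': 'nature/landscape', 'ocean': 'nature/landscape',
--     'forest': 'nature/landscape', 'landscape': 'nature/landscape',
--     'nature': 'nature/landscape', 'tree': 'nature/landscape',
--     'sky': 'nature/landscape',
--     'city': 'urban/architecture', 'building': 'urban/architecture',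
--     'urban': 'urban/architecture', 'street': 'urban/architecture',
--     'architecture': 'urban/architecture',
--     'fantasy': 'fantasy/magical', 'magical': 'fantasy/magical',
--     'mystical': 'fantasy/magical', 'ethereal': 'fantasy/magical',
--     'dragon': 'fantasy/magical', 'castle': 'fantasy/magical',
--     'scifi': 'sci-fi/futuristic', 'futuristic': 'sci-fi/futuristic',
--     'cyberpunk': 'sci-fi/futuristic', 'space': 'sci-fi/futuristic',
--     'robot': 'sci-fi/futuristic', 'alien': 'sci-fi/futuristic',
--     'portrait': 'portrait/character', 'face': 'portrait/character',
--     'person': 'portrait/character', 'character': 'portrait/character',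
--     'woman': 'portrait/character', 'man': 'portrait/character',
--     'abstract': 'abstract/geometric', 'geometric': 'abstract/geometric',
--     'pattern': 'abstract/geometric', 'shapes': 'abstract/geometric',
-- }
--
-- _LENGTHS = sorted({len(k) for k in _KEYWORD_TO_CONCEPT})
--
--
-- def detect_artistic_concepts(prompt, keywords):
--     prompt_lower = prompt.lower()
--     detected = set()
--     for w in keywords.get('keywords', []):
--         tag = _KEYWORD_TO_CONCEPT.get(w)
--         if tag is not None:
--             detected.add(tag)
--     for j in range(len(prompt_lower)):
--         for L in _LENGTHS:
--             tag = _KEYWORD_TO_CONCEPT.get(prompt_lower[j:j + L])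
--             if tag is not None:
--                 detected.add(tag)
--     result = [tag for tag in _CONCEPT_ORDER if tag in detected]
--     return result if result else ['general']
-- ===== Notes on version B (the rewrite author's own statement) =====
-- stated objective: alternative
-- what changed: B inverts the matching direction: instead of A's six any() scans searching each of 34 keywords inside the prompt, B slides a window over the prompt once and looks each window (and each keyword-list entry) up in a keyword-to-concept hash map, accumulating hit concepts in a set and emitting them in a fixed concept order.
import Mathlib
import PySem

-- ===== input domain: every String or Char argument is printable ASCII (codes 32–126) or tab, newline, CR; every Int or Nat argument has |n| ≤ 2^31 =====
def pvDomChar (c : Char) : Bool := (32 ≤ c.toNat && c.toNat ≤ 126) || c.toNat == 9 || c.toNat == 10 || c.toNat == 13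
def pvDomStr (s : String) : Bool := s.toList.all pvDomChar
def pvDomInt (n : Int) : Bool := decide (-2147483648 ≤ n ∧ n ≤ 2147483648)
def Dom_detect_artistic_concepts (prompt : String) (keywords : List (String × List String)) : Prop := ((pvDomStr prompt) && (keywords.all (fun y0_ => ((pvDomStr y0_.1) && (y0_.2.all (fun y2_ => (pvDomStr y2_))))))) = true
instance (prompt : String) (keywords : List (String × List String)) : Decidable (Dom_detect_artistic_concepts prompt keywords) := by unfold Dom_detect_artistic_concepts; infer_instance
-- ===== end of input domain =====

-- B inverts the matching direction: a window slides over the prompt and each window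
-- (and each keyword-list entry) is looked up in a keyword→concept map, instead of
-- A's six any()-scans searching each keyword in the prompt (objective: alternative).


-- ===== PORT A =====
def detect_artistic_concepts (prompt : String) (keywords : List (String × List String)) : List String :=
  let concepts : List String := []
  let prompt_lower := PySem.Str.lower prompt
  let keyword_list := (PySem.Dict.ofList keywords).getD "keywords" []
  let nature_keywords : List String := ["mountain", "ocean", "forest", "landscape", "nature", "tree", "sky"]
  let concepts := if nature_keywords.any (fun kw => keyword_list.contains kw || PySem.Str.isIn kw prompt_lower) then concepts ++ ["nature/landscape"] else concepts
  let urban_keywords : List String := ["city", "building", "urban", "street", "architecture"]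
  let concepts := if urban_keywords.any (fun kw => keyword_list.contains kw || PySem.Str.isIn kw prompt_lower) then concepts ++ ["urban/architecture"] else concepts
  let fantasy_keywords : List String := ["fantasy", "magical", "mystical", "ethereal", "dragon", "castle"]
  let concepts := if fantasy_keywords.any (fun kw => keyword_list.contains kw || PySem.Str.isIn kw prompt_lower) then concepts ++ ["fantasy/magical"] else concepts
  let scifi_keywords : List String := ["scifi", "futuristic", "cyberpunk", "space", "robot", "alien"]
  let concepts := if scifi_keywords.any (fun kw => keyword_list.contains kw || PySem.Str.isIn kw prompt_lower) then concepts ++ ["sci-fi/futuristic"] else concepts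
  let portrait_keywords : List String := ["portrait", "face", "person", "character", "woman", "man"]
  let concepts := if portrait_keywords.any (fun kw => keyword_list.contains kw || PySem.Str.isIn kw prompt_lower) then concepts ++ ["portrait/character"] else concepts
  let abstract_keywords : List String := ["abstract", "geometric", "pattern", "shapes"]
  let concepts := if abstract_keywords.any (fun kw => keyword_list.contains kw || PySem.Str.isIn kw prompt_lower) then concepts ++ ["abstract/geometric"] else concepts
  if concepts = [] then ["general"] else concepts

-- ===== PORT B =====
def pvConceptOrder : List String :=
  ["nature/landscape", "urban/architecture", "fantasy/magical",
   "sci-fi/futuristic", "portrait/character", "abstract/geometric"]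

-- the module-level dict _KEYWORD_TO_CONCEPT (as an insertion-ordered association list)
def pvKeywordToConcept : List (String × String) :=
  [("mountain", "nature/landscape"), ("ocean", "nature/landscape"),
   ("forest", "nature/landscape"), ("landscape", "nature/landscape"),
   ("nature", "nature/landscape"), ("tree", "nature/landscape"),
   ("sky", "nature/landscape"),
   ("city", "urban/architecture"), ("building", "urban/architecture"),
   ("urban", "urban/architecture"), ("street", "urban/architecture"),
   ("architecture", "urban/architecture"),
   ("fantasy", "fantasy/magical"), ("magical", "fantasy/magical"),
   ("mystical", "fantasy/magical"), ("ethereal", "fantasy/magical"),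
   ("dragon", "fantasy/magical"), ("castle", "fantasy/magical"),
   ("scifi", "sci-fi/futuristic"), ("futuristic", "sci-fi/futuristic"),
   ("cyberpunk", "sci-fi/futuristic"), ("space", "sci-fi/futuristic"),
   ("robot", "sci-fi/futuristic"), ("alien", "sci-fi/futuristic"),
   ("portrait", "portrait/character"), ("face", "portrait/character"),
   ("person", "portrait/character"), ("character", "portrait/character"),
   ("woman", "portrait/character"), ("man", "portrait/character"),
   ("abstract", "abstract/geometric"), ("geometric", "abstract/geometric"),
   ("pattern", "abstract/geometric"), ("shapes", "abstract/geometric")]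

-- _LENGTHS = sorted({len(k) for k in _KEYWORD_TO_CONCEPT}), evaluated at module load
def pvLens : List Int := [3, 4, 5, 6, 7, 8, 9, 10, 12]

def detect_artistic_concepts_alt (prompt : String) (keywords : List (String × List String)) : List String :=
  let prompt_lower := PySem.Str.lower prompt
  let idx := PySem.Dict.ofList pvKeywordToConcept
  let detected : PySem.Set String :=
    ((PySem.Dict.ofList keywords).getD "keywords" []).foldl
      (fun s w => match idx.get? w with
        | some tag => PySem.Set.add s tag
        | none => s) PySem.Set.empty
  let detected :=
    (PySem.List.pyRange 0 (PySem.Str.len prompt_lower) 1).foldl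
      (fun s j => pvLens.foldl
        (fun s L => match idx.get? (PySem.Str.slice prompt_lower (some j) (some (j + L))) with
          | some tag => PySem.Set.add s tag
          | none => s) s) detected
  let result := pvConceptOrder.filter (fun t => PySem.Set.contains detected t)
  if result = [] then ["general"] else result

-- ===== PRECONDITION & SPEC =====
def Spec_detect_artistic_concepts (prompt : String) (keywords : List (String × List String)) (out : List String) : Prop := out = detect_artistic_concepts_alt prompt keywords
instance (prompt : String) (keywords : List (String × List String)) (out : List String) : Decidable (Spec_detect_artistic_concepts prompt keywords out) := by unfold Spec_detect_artistic_concepts; infer_instance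

-- ===== CLAIM (what is proved, stated in full; the proofs are below) =====
def Claim_equal_detect_artistic_concepts : Prop := ∀ (prompt : String) (keywords : List (String × List String)), Dom_detect_artistic_concepts prompt keywords → Spec_detect_artistic_concepts prompt keywords (detect_artistic_concepts prompt keywords)

-- ===== LEMMAS AND PROOFS =====

-- the per-group hit condition A tests
def groupCond (kl : List String) (pl : String) (g : List String) : Bool :=
  g.any (fun kw => kl.contains kw || PySem.Str.isIn kw pl)

-- A's result as a function of the six group bits
def aForm (b1 b2 b3 b4 b5 b6 : Bool) : List String :=
  let c : List String := []
  let c := if b1 then c ++ ["nature/landscape"] else c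
  let c := if b2 then c ++ ["urban/architecture"] else c
  let c := if b3 then c ++ ["fantasy/magical"] else c
  let c := if b4 then c ++ ["sci-fi/futuristic"] else c
  let c := if b5 then c ++ ["portrait/character"] else c
  let c := if b6 then c ++ ["abstract/geometric"] else c
  if c = [] then ["general"] else c

-- B's result as a function of the six group bits
def bForm (b1 b2 b3 b4 b5 b6 : Bool) : List String :=
  let r := (if b1 then ["nature/landscape"] else []) ++ (if b2 then ["urban/architecture"] else [])
        ++ (if b3 then ["fantasy/magical"] else []) ++ (if b4 then ["sci-fi/futuristic"] else [])
        ++ (if b5 then ["portrait/character"] else []) ++ (if b6 then ["abstract/geometric"] else [])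
  if r = [] then ["general"] else r

theorem form_eq (b1 b2 b3 b4 b5 b6 : Bool) :
    aForm b1 b2 b3 b4 b5 b6 = bForm b1 b2 b3 b4 b5 b6 := by
  cases b1 <;> cases b2 <;> cases b3 <;> cases b4 <;> cases b5 <;> cases b6 <;> rfl

-- filter as a concatenation of singletons
theorem filter_cons_append {α : Type} (p : α → Bool) (x : α) (xs : List α) :
    List.filter p (x :: xs) = (if p x then [x] else []) ++ List.filter p xs := by
  by_cases h : p x = true <;> simp [List.filter, h]

-- membership test after adding one element to a set
theorem contains_add (s : PySem.Set String) (x t : String) :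
    PySem.Set.contains (PySem.Set.add s x) t = (PySem.Set.contains s t || x == t) := by
  rw [Bool.eq_iff_iff, Bool.or_eq_true]
  simp only [PySem.Set.contains_iff, beq_iff_eq, PySem.Set.mem_add]
  tauto

-- membership in a fold that adds the result of an optional lookup
theorem contains_foldl_lookup {α : Type} (f : α → Option String) (xs : List α)
    (s : PySem.Set String) (t : String) :
    PySem.Set.contains
      (xs.foldl (fun s x => match f x with
        | some tag => PySem.Set.add s tag
        | none => s) s) t
      = (PySem.Set.contains s t || xs.any (fun x => f x == some t)) := by
  induction xs generalizing s with
  | nil => simp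
  | cons x rest ih =>
    simp only [List.foldl_cons, List.any_cons]
    cases h : f x with
    | none => rw [ih]; simp
    | some tag => rw [ih, contains_add, Bool.or_assoc]; simp

-- the nested (position × length) version of the same fold
theorem contains_foldl_lookup2 {α β : Type} (g : α → β → Option String) (js : List α)
    (ls : List β) (s : PySem.Set String) (t : String) :
    PySem.Set.contains
      (js.foldl (fun s j => ls.foldl (fun s L => match g j L with
        | some tag => PySem.Set.add s tag
        | none => s) s) s) t
      = (PySem.Set.contains s t || js.any (fun j => ls.any (fun L => g j L == some t))) := by
  induction js generalizing s with
  | nil => simp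
  | cons j rest ih =>
    simp only [List.foldl_cons, List.any_cons]
    rw [ih, contains_foldl_lookup (g j) ls s t, Bool.or_assoc]

theorem any_congr_mem {α : Type} (l : List α) (p q : α → Bool)
    (h : ∀ a ∈ l, p a = q a) : l.any p = l.any q := by
  induction l with
  | nil => rfl
  | cons x rest ih =>
    simp only [List.any_cons, h x (by simp), ih (fun a ha => h a (by simp [ha]))]

theorem any_pair_eq_mem {w t : String} (l : List (String × String)) :
    (l.any (fun p => p.1 == w && p.2 == t)) = true ↔ (w, t) ∈ l := by
  simp only [List.any_eq_true, Bool.and_eq_true, beq_iff_eq]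
  constructor
  · rintro ⟨⟨a, b⟩, hm, h1, h2⟩; subst h1; subst h2; exact hm
  · intro hm; exact ⟨(w, t), hm, rfl, rfl⟩

-- lookup in the literal keyword→concept dict, as a scan of the association list
set_option maxRecDepth 100000 in
theorem get?_index (w t : String) :
    ((PySem.Dict.ofList pvKeywordToConcept).get? w == some t)
      = pvKeywordToConcept.any (fun p => p.1 == w && p.2 == t) := by
  rw [Bool.eq_iff_iff, beq_iff_eq, any_pair_eq_mem,
    PySem.Dict.get?_eq_some_iff_mem_items _ _ _ (by decide)]
  have hitems : (PySem.Dict.ofList pvKeywordToConcept).items = pvKeywordToConcept := by decide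
  rw [hitems]

theorem any_any_comm {α β : Type} (l : List α) (m : List β) (q : α → β → Bool) :
    l.any (fun a => m.any (fun b => q a b)) = m.any (fun b => l.any (fun a => q a b)) := by
  rw [Bool.eq_iff_iff]
  simp only [List.any_eq_true]
  constructor
  · rintro ⟨a, ha, b, hb, h⟩; exact ⟨b, hb, a, ha, h⟩
  · rintro ⟨b, hb, a, ha, h⟩; exact ⟨a, ha, b, hb, h⟩

theorem any_and_right {α : Type} (l : List α) (p : α → Bool) (c : Bool) :
    l.any (fun a => p a && c) = (l.any p && c) := by
  cases c <;> simp

theorem any_or_merge {α : Type} (l : List α) (a b c : α → Bool) :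
    (l.any (fun x => a x && c x) || l.any (fun x => b x && c x))
      = l.any (fun x => (a x || b x) && c x) := by
  rw [Bool.eq_iff_iff]
  simp only [Bool.or_eq_true, List.any_eq_true, Bool.and_eq_true]
  constructor
  · rintro (⟨x, hx, h1, h2⟩ | ⟨x, hx, h1, h2⟩)
    · exact ⟨x, hx, Or.inl h1, h2⟩
    · exact ⟨x, hx, Or.inr h1, h2⟩
  · rintro ⟨x, hx, h1 | h1, h2⟩
    · exact Or.inl ⟨x, hx, h1, h2⟩
    · exact Or.inr ⟨x, hx, h1, h2⟩

-- the window scan finds a keyword iff it is a substring, for keys of an indexed length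
theorem scan_eq_isIn (pl kw : String) (h1 : kw.toList ≠ [])
    (hL : ((kw.toList.length : Int)) ∈ pvLens) :
    (PySem.List.pyRange 0 (PySem.Str.len pl) 1).any (fun j =>
        pvLens.any (fun L => kw == PySem.Str.slice pl (some j) (some (j + L))))
      = PySem.Str.isIn kw pl := by
  rw [Bool.eq_iff_iff, PySem.Str.isIn_eq, ← PySem.Chars.exists_prefix_drop_iff_isIn]
  constructor
  · rintro h
    simp only [List.any_eq_true, PySem.List.mem_pyRange_one, beq_iff_eq] at h
    obtain ⟨j, ⟨hj0, _⟩, L, hLmem, hkw⟩ := h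
    have hL0 : (0:Int) ≤ L := by
      simp only [pvLens, List.mem_cons, List.not_mem_nil, or_false] at hLmem
      omega
    have : kw.toList = List.take ((j+L).toNat - j.toNat) (List.drop j.toNat pl.toList) := by
      rw [hkw]
      simp only [PySem.Str.slice, PySem.Chars.slice_eq_listSlice, String.toList_ofList]
      rw [PySem.List.slice_toNat _ hj0 (by omega)]
    exact ⟨j.toNat, this ▸ List.take_prefix _ _⟩
  · rintro ⟨j, hpre⟩
    have hjlt : j < pl.toList.length := by
      by_contra hge
      rw [List.drop_eq_nil_of_le (by omega)] at hpre
      exact h1 (List.prefix_nil.mp hpre)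
    simp only [List.any_eq_true, PySem.List.mem_pyRange_one, beq_iff_eq]
    refine ⟨(j : Int), ⟨by omega, by rw [PySem.Str.len_eq]; omega⟩,
      ((kw.toList.length : Int)), hL, ?_⟩
    apply String.toList_inj.mp
    have := List.prefix_iff_eq_take.mp hpre
    simp only [PySem.Str.slice, PySem.Chars.slice_eq_listSlice, String.toList_ofList]
    rw [PySem.List.slice_natCast_add pl.toList j kw.toList.length]
    exact this

-- characterisation of B's detected set: a concept is in it iff some index entry
-- with that concept has its keyword in the keyword list or inside the prompt
theorem B_detected (kl : List String) (pl : String) (t : String) :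
    PySem.Set.contains
      ((PySem.List.pyRange 0 (PySem.Str.len pl) 1).foldl
        (fun s j => pvLens.foldl
          (fun s L => match (PySem.Dict.ofList pvKeywordToConcept).get?
              (PySem.Str.slice pl (some j) (some (j + L))) with
            | some tag => PySem.Set.add s tag
            | none => s) s)
        (kl.foldl (fun s w => match (PySem.Dict.ofList pvKeywordToConcept).get? w with
          | some tag => PySem.Set.add s tag
          | none => s) PySem.Set.empty)) t
      = pvKeywordToConcept.any (fun p => (kl.contains p.1 || PySem.Str.isIn p.1 pl) && p.2 == t) := by
  rw [contains_foldl_lookup2, contains_foldl_lookup]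
  have hempty : PySem.Set.contains (PySem.Set.empty (α := String)) t = false := rfl
  rw [hempty, Bool.false_or]
  -- rewrite both lookups through the association list
  have hkl : kl.any (fun w => (PySem.Dict.ofList pvKeywordToConcept).get? w == some t)
      = pvKeywordToConcept.any (fun p => kl.contains p.1 && p.2 == t) := by
    calc kl.any (fun w => (PySem.Dict.ofList pvKeywordToConcept).get? w == some t)
        = kl.any (fun w => pvKeywordToConcept.any (fun p => p.1 == w && p.2 == t)) := by
          exact any_congr_mem _ _ _ (fun w _ => get?_index w t)
      _ = pvKeywordToConcept.any (fun p => kl.any (fun w => p.1 == w && p.2 == t)) :=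
          any_any_comm _ _ _
      _ = pvKeywordToConcept.any (fun p => kl.contains p.1 && p.2 == t) := by
          refine any_congr_mem _ _ _ (fun p _ => ?_)
          rw [any_and_right, List.contains_eq_any_beq]
  have hscan : (PySem.List.pyRange 0 (PySem.Str.len pl) 1).any (fun j =>
        pvLens.any (fun L => (PySem.Dict.ofList pvKeywordToConcept).get?
          (PySem.Str.slice pl (some j) (some (j + L))) == some t))
      = pvKeywordToConcept.any (fun p => PySem.Str.isIn p.1 pl && p.2 == t) := by
    calc (PySem.List.pyRange 0 (PySem.Str.len pl) 1).any (fun j =>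
          pvLens.any (fun L => (PySem.Dict.ofList pvKeywordToConcept).get?
            (PySem.Str.slice pl (some j) (some (j + L))) == some t))
        = (PySem.List.pyRange 0 (PySem.Str.len pl) 1).any (fun j =>
            pvLens.any (fun L => pvKeywordToConcept.any (fun p =>
              p.1 == PySem.Str.slice pl (some j) (some (j + L)) && p.2 == t))) := by
          refine any_congr_mem _ _ _ (fun j _ => ?_)
          exact any_congr_mem _ _ _ (fun L _ => get?_index _ t)
      _ = (PySem.List.pyRange 0 (PySem.Str.len pl) 1).any (fun j =>
            pvKeywordToConcept.any (fun p => pvLens.any (fun L =>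
              p.1 == PySem.Str.slice pl (some j) (some (j + L)) && p.2 == t))) := by
          refine any_congr_mem _ _ _ (fun j _ => ?_)
          exact any_any_comm pvLens pvKeywordToConcept (fun L p =>
            p.1 == PySem.Str.slice pl (some j) (some (j + L)) && p.2 == t)
      _ = pvKeywordToConcept.any (fun p => (PySem.List.pyRange 0 (PySem.Str.len pl) 1).any
            (fun j => pvLens.any (fun L =>
              p.1 == PySem.Str.slice pl (some j) (some (j + L)) && p.2 == t))) :=
          any_any_comm _ _ _
      _ = pvKeywordToConcept.any (fun p => PySem.Str.isIn p.1 pl && p.2 == t) := by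
          refine any_congr_mem _ _ _ (fun p hp => ?_)
          have hbody : (fun j => pvLens.any (fun L =>
              p.1 == PySem.Str.slice pl (some j) (some (j + L)) && p.2 == t))
              = (fun j => pvLens.any (fun L =>
                p.1 == PySem.Str.slice pl (some j) (some (j + L))) && p.2 == t) := by
            funext j; rw [any_and_right]
          rw [hbody, any_and_right, scan_eq_isIn pl p.1 ?_ ?_]
          · revert hp; rw [pvKeywordToConcept]; intro hp
            fin_cases hp <;> decide
          · revert hp; rw [pvKeywordToConcept]; intro hp
            fin_cases hp <;> decide
  rw [hkl, hscan, any_or_merge]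

theorem A_eq (prompt : String) (keywords : List (String × List String)) :
    detect_artistic_concepts prompt keywords =
      aForm
        (groupCond ((PySem.Dict.ofList keywords).getD "keywords" []) (PySem.Str.lower prompt) ["mountain", "ocean", "forest", "landscape", "nature", "tree", "sky"])
        (groupCond ((PySem.Dict.ofList keywords).getD "keywords" []) (PySem.Str.lower prompt) ["city", "building", "urban", "street", "architecture"])
        (groupCond ((PySem.Dict.ofList keywords).getD "keywords" []) (PySem.Str.lower prompt) ["fantasy", "magical", "mystical", "ethereal", "dragon", "castle"])
        (groupCond ((PySem.Dict.ofList keywords).getD "keywords" []) (PySem.Str.lower prompt) ["scifi", "futuristic", "cyberpunk", "space", "robot", "alien"])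
        (groupCond ((PySem.Dict.ofList keywords).getD "keywords" []) (PySem.Str.lower prompt) ["portrait", "face", "person", "character", "woman", "man"])
        (groupCond ((PySem.Dict.ofList keywords).getD "keywords" []) (PySem.Str.lower prompt) ["abstract", "geometric", "pattern", "shapes"]) := rfl

theorem B_eq (prompt : String) (keywords : List (String × List String)) :
    detect_artistic_concepts_alt prompt keywords =
      bForm
        (groupCond ((PySem.Dict.ofList keywords).getD "keywords" []) (PySem.Str.lower prompt) ["mountain", "ocean", "forest", "landscape", "nature", "tree", "sky"])
        (groupCond ((PySem.Dict.ofList keywords).getD "keywords" []) (PySem.Str.lower prompt) ["city", "building", "urban", "street", "architecture"])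
        (groupCond ((PySem.Dict.ofList keywords).getD "keywords" []) (PySem.Str.lower prompt) ["fantasy", "magical", "mystical", "ethereal", "dragon", "castle"])
        (groupCond ((PySem.Dict.ofList keywords).getD "keywords" []) (PySem.Str.lower prompt) ["scifi", "futuristic", "cyberpunk", "space", "robot", "alien"])
        (groupCond ((PySem.Dict.ofList keywords).getD "keywords" []) (PySem.Str.lower prompt) ["portrait", "face", "person", "character", "woman", "man"])
        (groupCond ((PySem.Dict.ofList keywords).getD "keywords" []) (PySem.Str.lower prompt) ["abstract", "geometric", "pattern", "shapes"]) := by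
  unfold detect_artistic_concepts_alt
  simp only [pvConceptOrder, filter_cons_append, List.filter_nil, List.append_nil, B_detected]
  simp only [pvKeywordToConcept, List.any_cons, List.any_nil,
    String.reduceBEq, beq_self_eq_true, Bool.and_true, Bool.and_false,
    Bool.or_false, Bool.false_or, bForm, groupCond]
  simp only [List.append_assoc]

-- ===== VERDICT (by name: the statement is the Claim_ definition above) =====
theorem detect_artistic_concepts_spec : Claim_equal_detect_artistic_concepts := by
  intro prompt keywords _
  unfold Spec_detect_artistic_concepts
  rw [A_eq, B_eq, form_eq]
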